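-- pv_equiv track=rewrite | github.com/Kyouichirou/D7E1293 | Python/lis.py | get_lis
-- ===== SOURCE A (Python) =====
-- def get_lis(nums, indexs, index, n):
--     # get the Subsequence
--     results = []
--     for i, e in enumerate(indexs):
--         if e == index:
--             r = []
--             k = index + 1
--             for j in range(i, n):
--                 if k - indexs[j] == 1:
--                     r.append(nums[j])
--                 else:
--                     continue
--                 k = indexs[j]
--             results.append(r)
--     return results
-- ===== SOURCE B (Python) =====
-- def _first_after(cand, p):
--     # first position in cand (ascending) strictly greater than p
--     for x in cand:
--         if x > p:
--             return x
--     return None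
--
-- def get_lis(nums, indexs, index, n):
--     # index positions by dp-value once, then walk each chain touching only
--     # the buckets of the values it needs (instead of rescanning the suffix)
--     limit = min(n, len(indexs))
--     pos = {}
--     for j in range(limit):
--         pos.setdefault(indexs[j], []).append(j)
--     results = []
--     for i, e in enumerate(indexs):
--         if e != index:
--             continue
--         r = []
--         if i < n:
--             r.append(nums[i])
--             cur = index - 1
--             p = i
--             while True:
--                 j = _first_after(pos.get(cur, ()), p)
--                 if j is None:
--                     break
--                 r.append(nums[j])
--                 p = j
--                 cur -= 1
--         results.append(r)
--     return results
-- ===== Notes on version B (the rewrite author's own statement) =====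
-- stated objective: alternative
-- what changed: Instead of rescanning the whole suffix indexs[i:n] for every start position, B builds a dict mapping each dp-value to its ascending position list once, then reconstructs each chain by looking up only the bucket of the next-lower dp-value.
-- outside the precondition, e.g. on get_lis([5], [0, 1], 0, 2): A returns [[5]], B returns [[5]]
import Mathlib
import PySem

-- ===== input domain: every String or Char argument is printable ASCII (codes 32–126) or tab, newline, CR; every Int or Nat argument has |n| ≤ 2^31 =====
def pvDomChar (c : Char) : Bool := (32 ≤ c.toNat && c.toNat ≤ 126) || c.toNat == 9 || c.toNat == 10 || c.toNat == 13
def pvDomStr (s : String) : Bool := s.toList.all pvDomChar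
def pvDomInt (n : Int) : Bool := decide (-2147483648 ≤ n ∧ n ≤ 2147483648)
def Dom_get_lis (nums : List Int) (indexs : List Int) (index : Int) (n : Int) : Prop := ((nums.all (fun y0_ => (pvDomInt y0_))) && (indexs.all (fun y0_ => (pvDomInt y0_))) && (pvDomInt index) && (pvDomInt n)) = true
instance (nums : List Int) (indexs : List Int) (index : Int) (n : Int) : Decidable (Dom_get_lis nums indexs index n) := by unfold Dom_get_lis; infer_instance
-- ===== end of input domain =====

-- ===== PORT A =====
-- B indexes positions per dp-value once instead of rescanning the suffix per start (alternative algorithm, same proved return value).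
-- inner loop body of A: state (r, k); 'if k - indexs[j] == 1: r.append(nums[j]); k = indexs[j]'
def alisStep (nums : List Int) (indexs : List Int) (rk : List Int × Int) (j : Int) : List Int × Int :=
  if rk.2 - PySem.List.pyGetD indexs j 0 = 1 then
    (rk.1 ++ [PySem.List.pyGetD nums j 0], PySem.List.pyGetD indexs j 0)
  else rk

def get_lis (nums : List Int) (indexs : List Int) (index : Int) (n : Int) : List (List Int) :=
  (PySem.List.enumerate indexs).foldl (fun results ie =>
    if ie.2 = index then
      results ++ [((PySem.List.pyRange ie.1 n 1).foldl (alisStep nums indexs) ([], index + 1)).1]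
    else results) []

-- ===== PORT B =====
-- _first_after: first element of cand strictly greater than p (cand kept ascending)
def firstAfter (cand : List Int) (p : Int) : Option Int :=
  match cand with
  | [] => none
  | x :: rest => if x > p then some x else firstAfter rest p

-- 'pos.setdefault(indexs[j], []).append(j)' = insert key (old-bucket ++ [j])
def buildPos (indexs : List Int) (limit : Int) : PySem.Dict Int (List Int) :=
  (PySem.List.pyRange 0 limit 1).foldl (fun d j =>
    d.insert (PySem.List.pyGetD indexs j 0)
      (d.getD (PySem.List.pyGetD indexs j 0) [] ++ [j])) PySem.Dict.empty

-- the 'while True' loop of B; it performs at most limit ≤ len(indexs) iterations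
-- (p strictly increases through positions < limit), so fuel = indexs.length is enough
def chainLoop (nums : List Int) (pos : PySem.Dict Int (List Int)) :
    Nat → List Int → Int → Int → List Int
  | 0, r, _, _ => r
  | fuel + 1, r, cur, p =>
    match firstAfter (pos.getD cur []) p with
    | none => r
    | some j => chainLoop nums pos fuel (r ++ [PySem.List.pyGetD nums j 0]) (cur - 1) j

def get_lis_alt (nums : List Int) (indexs : List Int) (index : Int) (n : Int) : List (List Int) :=
  let pos := buildPos indexs (min n (indexs.length : Int))
  (PySem.List.enumerate indexs).foldl (fun results ie =>
    if ie.2 ≠ index then results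
    else
      results ++ [if ie.1 < n then
          chainLoop nums pos indexs.length
            [PySem.List.pyGetD nums ie.1 0] (index - 1) ie.1
        else []]) []

-- ===== PRECONDITION & SPEC =====
-- Pre_ excludes the inputs on which Python A raises IndexError (the scan reading indexs[j] or
-- nums[j] past the end); it also excludes (cited in claim.json) inputs where n exceeds
-- len(nums) yet no appended position happens to reach past nums, since whether A raises there
-- depends on the scan itself and is not closed-form.
def Pre_get_lis (nums : List Int) (indexs : List Int) (index : Int) (n : Int) : Prop :=
  index ∉ indexs ∨ (n ≤ (indexs.length : Int) ∧ n ≤ (nums.length : Int))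
instance (nums : List Int) (indexs : List Int) (index : Int) (n : Int) : Decidable (Pre_get_lis nums indexs index n) := by unfold Pre_get_lis; infer_instance

def pvWitness_get_lis : List Int × List Int × Int × Int := ([5, 7, 9], [0, 1, 1], 0, 3)

def Spec_get_lis (nums : List Int) (indexs : List Int) (index : Int) (n : Int) (out : List (List Int)) : Prop := out = get_lis_alt nums indexs index n
instance (nums : List Int) (indexs : List Int) (index : Int) (n : Int) (out : List (List Int)) : Decidable (Spec_get_lis nums indexs index n out) := by unfold Spec_get_lis; infer_instance


-- ===== CLAIM (what is proved, stated in full; the proofs are below) =====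
def Claim_equal_get_lis : Prop := ∀ (nums : List Int) (indexs : List Int) (index : Int) (n : Int), Dom_get_lis nums indexs index n → Pre_get_lis nums indexs index n → Spec_get_lis nums indexs index n (get_lis nums indexs index n)

-- ===== LEMMAS AND PROOFS =====

-- find? only looks at members (no such congruence lemma exists for List.find? in the library)
lemma find?_congr_mem {α : Type} {l : List α} {f g : α → Bool}
    (h : ∀ x ∈ l, f x = g x) : l.find? f = l.find? g := by
  induction l with
  | nil => rfl
  | cons a t ih =>
    have ha := h a (by simp)
    cases hfa : f a with
    | true => simp [hfa, ha ▸ hfa]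
    | false =>
      have := ih (fun x hx => h x (by simp [hx]))
      simp [hfa, ha ▸ hfa, this]

-- grouping fold: looking up v in the group-by dict yields the positions whose key is v
lemma getD_groupFold (key : Int → Int) (l : List Int) (d : PySem.Dict Int (List Int)) (v : Int) :
    (l.foldl (fun d j => d.insert (key j) (d.getD (key j) [] ++ [j])) d).getD v []
      = d.getD v [] ++ l.filter (fun j => decide (key j = v)) := by
  induction l generalizing d with
  | nil => simp
  | cons a t ih =>
    simp only [List.foldl_cons, List.filter_cons, ih, PySem.Dict.getD_insert]
    by_cases h : v = key a
    · simp [h]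
    · have h' : ¬ (key a = v) := fun hh => h hh.symm
      simp [h, h']

lemma getD_buildPos (indexs : List Int) (limit : Int) (v : Int) :
    (buildPos indexs limit).getD v []
      = (PySem.List.pyRange 0 limit 1).filter
          (fun j => decide (PySem.List.pyGetD indexs j 0 = v)) := by
  simpa [buildPos] using getD_groupFold (fun j => PySem.List.pyGetD indexs j 0)
    (PySem.List.pyRange 0 limit 1) PySem.Dict.empty v

lemma firstAfter_eq_find? (cand : List Int) (p : Int) :
    firstAfter cand p = cand.find? (fun x => decide (p < x)) := by
  induction cand with
  | nil => rfl
  | cons x t ih => by_cases h : p < x <;> simp [firstAfter, h, ih]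

-- the bucket search of B finds exactly the first position in [p+1, n) carrying value v
lemma firstAfter_bucket (indexs : List Int) (n p v : Int) (hp : 0 ≤ p) :
    firstAfter ((buildPos indexs n).getD v []) p
      = (PySem.List.pyRange (p + 1) n 1).find?
          (fun j => decide (PySem.List.pyGetD indexs j 0 = v)) := by
  rw [firstAfter_eq_find?, getD_buildPos, List.find?_filter]
  by_cases h : p + 1 ≤ n
  · rw [PySem.List.pyRange_one_append 0 (p + 1) n (by omega) h, List.find?_append]
    have h1 : (PySem.List.pyRange 0 (p + 1) 1).find?
        (fun a => decide ((decide (PySem.List.pyGetD indexs a 0 = v)) = true ∧ (decide (p < a)) = true)) = none := by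
      rw [List.find?_eq_none]
      intro x hx
      have := (PySem.List.mem_pyRange_one).1 hx
      simp only [decide_eq_true_eq, not_and]
      intro _
      omega
    rw [h1, Option.none_or]
    apply find?_congr_mem
    intro x hx
    have := (PySem.List.mem_pyRange_one).1 hx
    simp only [decide_eq_true_eq]
    have hpx : p < x := by omega
    simp [hpx]
  · rw [PySem.List.pyRange_one_eq_nil (a := p + 1) (b := n) (by omega), List.find?_nil,
        List.find?_eq_none]
    intro x hx
    have := (PySem.List.mem_pyRange_one).1 hx
    simp only [decide_eq_true_eq, not_and]
    intro _
    omega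

-- A's scan from position a with state (r, k): nothing happens until the first j with
-- indexs[j] = k - 1, which is appended, and the scan continues past it with k one lower
lemma scan_eq (nums indexs : List Int) (b : Int) :
    ∀ (m : Nat) (a : Int), (b - a).toNat ≤ m → ∀ (r : List Int) (k : Int),
    (PySem.List.pyRange a b 1).foldl (alisStep nums indexs) (r, k)
      = match (PySem.List.pyRange a b 1).find?
              (fun j => decide (PySem.List.pyGetD indexs j 0 = k - 1)) with
        | none => (r, k)
        | some j => (PySem.List.pyRange (j + 1) b 1).foldl (alisStep nums indexs)
            (r ++ [PySem.List.pyGetD nums j 0], k - 1) := by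
  intro m
  induction m with
  | zero =>
    intro a ha r k
    rw [PySem.List.pyRange_one_eq_nil (by omega)]
    simp
  | succ m ih =>
    intro a ha r k
    by_cases hab : a < b
    · rw [PySem.List.pyRange_one_cons hab, List.foldl_cons, List.find?_cons]
      by_cases hhit : PySem.List.pyGetD indexs a 0 = k - 1
      · have hstep : alisStep nums indexs (r, k) a
            = (r ++ [PySem.List.pyGetD nums a 0], k - 1) := by
          unfold alisStep
          rw [if_pos (show k - PySem.List.pyGetD indexs a 0 = 1 by omega), hhit]
        rw [hstep]
        simp [hhit]
      · have hstep : alisStep nums indexs (r, k) a = (r, k) := by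
          unfold alisStep
          rw [if_neg (show ¬ k - PySem.List.pyGetD indexs a 0 = 1 by omega)]
        simp only [hhit, decide_false]
        rw [hstep, ih (a + 1) (by omega) r k]
    · rw [PySem.List.pyRange_one_eq_nil (by omega)]
      simp

-- the crux: A's remaining scan computes exactly B's chain loop
lemma scan_eq_chainLoop (nums indexs : List Int) (n : Int)
    (hn : n ≤ (indexs.length : Int)) :
    ∀ (fuel : Nat) (p v : Int) (r : List Int), 0 ≤ p → (n - (p + 1)).toNat ≤ fuel →
    ((PySem.List.pyRange (p + 1) n 1).foldl (alisStep nums indexs) (r, v + 1)).1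
      = chainLoop nums (buildPos indexs (min n (indexs.length : Int))) fuel r v p := by
  rw [min_eq_left hn]
  intro fuel
  induction fuel with
  | zero =>
    intro p v r hp hf
    rw [PySem.List.pyRange_one_eq_nil (by omega)]
    simp [chainLoop]
  | succ fuel ih =>
    intro p v r hp hf
    have hv1 : v + 1 - 1 = v := by ring
    rw [chainLoop, firstAfter_bucket indexs n p v hp,
        scan_eq nums indexs n ((n - (p + 1)).toNat) (p + 1) (by omega) r (v + 1), hv1]
    cases hfind : (PySem.List.pyRange (p + 1) n 1).find?
        (fun j => decide (PySem.List.pyGetD indexs j 0 = v)) with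
    | none => rfl
    | some j =>
      have hj := (PySem.List.mem_pyRange_one).1 (List.mem_of_find?_eq_some hfind)
      have hrec := ih j (v - 1) (r ++ [PySem.List.pyGetD nums j 0]) (by omega) (by omega)
      rw [show v - 1 + 1 = v from by ring] at hrec
      simpa using hrec

-- one start position: A's inner loop equals B's chain for it
lemma inner_eq (nums indexs : List Int) (index n : Int)
    (hn : n ≤ (indexs.length : Int)) (k : Nat) (hk : k < indexs.length)
    (hv : indexs[k] = index) :
    ((PySem.List.pyRange (k : Int) n 1).foldl (alisStep nums indexs) ([], index + 1)).1
      = if (k : Int) < n then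
          chainLoop nums (buildPos indexs (min n (indexs.length : Int))) indexs.length
            [PySem.List.pyGetD nums (k : Int) 0] (index - 1) (k : Int)
        else [] := by
  by_cases hkn : (k : Int) < n
  · rw [if_pos hkn, PySem.List.pyRange_one_cons hkn, List.foldl_cons]
    have hg : PySem.List.pyGetD indexs (k : Int) 0 = index := by
      rw [PySem.List.pyGetD_natCast, List.getD_eq_getElem _ _ hk, hv]
    have hstep : alisStep nums indexs ([], index + 1) (k : Int)
        = ([PySem.List.pyGetD nums (k : Int) 0], index) := by
      simp [alisStep, hg]
    rw [hstep]
    have hrec := scan_eq_chainLoop nums indexs n hn indexs.length (k : Int) (index - 1)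
      [PySem.List.pyGetD nums (k : Int) 0] (by omega) (by omega)
    rw [show index - 1 + 1 = index from by ring] at hrec
    exact hrec
  · rw [if_neg hkn, PySem.List.pyRange_one_eq_nil (by omega)]
    rfl

-- ===== VERDICT (by name: the statement is the Claim_ definition above) =====
theorem get_lis_spec : Claim_equal_get_lis := by
  intro nums indexs index n _ hpre
  unfold Spec_get_lis
  simp only [get_lis, get_lis_alt]
  have hB : (fun (acc : List (List Int)) (ie : Int × Int) =>
      if ie.2 ≠ index then acc
      else acc ++ [if ie.1 < n then
          chainLoop nums (buildPos indexs (min n (indexs.length : Int))) indexs.length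
            [PySem.List.pyGetD nums ie.1 0] (index - 1) ie.1 else []])
      = (fun (acc : List (List Int)) (ie : Int × Int) =>
      if ie.2 = index then acc ++ [if ie.1 < n then
          chainLoop nums (buildPos indexs (min n (indexs.length : Int))) indexs.length
            [PySem.List.pyGetD nums ie.1 0] (index - 1) ie.1 else []] else acc) := by
    funext acc ie
    by_cases h : ie.2 = index <;> simp [h]
  rw [hB]
  rw [PySem.List.foldl_append_ite (p := fun ie : Int × Int => ie.2 = index)
        (f := fun ie : Int × Int =>
          ((PySem.List.pyRange ie.1 n 1).foldl (alisStep nums indexs) ([], index + 1)).1),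
      PySem.List.foldl_append_ite (p := fun ie : Int × Int => ie.2 = index)
        (f := fun ie : Int × Int => if ie.1 < n then
          chainLoop nums (buildPos indexs (min n (indexs.length : Int))) indexs.length
            [PySem.List.pyGetD nums ie.1 0] (index - 1) ie.1 else [])]
  simp only [List.nil_append]
  apply List.map_congr_left
  intro ie hie
  have hmem := (List.mem_filter.1 hie)
  obtain ⟨k, hk, hkeq⟩ := (PySem.List.mem_enumerate_iff indexs 0 ie).1 hmem.1
  have heq : ie.2 = index := by simpa using hmem.2
  have hv : indexs[k] = index := by
    have h2 : ie.2 = indexs[k] := by rw [hkeq]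
    rw [← h2, heq]
  have hn : n ≤ (indexs.length : Int) := by
    rcases hpre with h | h
    · exact absurd (hv ▸ List.getElem_mem hk) h
    · exact h.1
  have h1 : ie.1 = (k : Int) := by rw [hkeq]; simp
  rw [h1]
  exact inner_eq nums indexs index n hn k hk hv
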